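-- pv_equiv track=rewrite | github.com/petrzelk/pe-petrzelka | problems/p88.py | PE88_3
-- ===== SOURCE A (Python) =====
-- def PE88_3(limit: int = 12000):
-- 	result={}
-- 	factors=gen_factorization_dict(limit*2+1)
-- 	number=2
-- 	while len(result) < limit-1:
-- 		for product in factors[number][1:]:
-- 			k=len(product)+number-sum(product)
-- 			if k not in result and k<=limit:
-- 				result[k]=number
-- 		number+=1
-- 	return(sum(set(result.values())))
--
-- def gen_factorization_dict(limit: int= 12000) -> dict[int,list[list[int]]]:
-- 	factors={i:[[i]] for i in range(2,limit+1)}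
--
-- 	for number in range(2,limit+1):
--
-- 		for i in range(2,min(number,limit//number)+1):
-- 			factors[number*i]+=[factor_n+factor_i for factor_n in factors[number] for factor_i in factors[i] if factor_n[-1]>=factor_i[0] and factor_n+factor_i not in factors[number*i]]
--
-- 	return(factors)
-- ===== SOURCE B (Python) =====
-- def PE88_3(limit: int = 12000):
--     result = {}
--     number = 2
--     while len(result) < limit - 1:
--         for f in _facs(number, number):
--             if len(f) >= 2:
--                 k = len(f) + number - sum(f)
--                 if k not in result and k <= limit:
--                     result[k] = number
--         number += 1
--     return sum(set(result.values()))
--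
--
-- def _facs(n, mx):
--     # nonincreasing factorizations of n into factors >= 2, all factors <= mx
--     if n == 1:
--         return [[]]
--     out = []
--     for d in range(2, min(n, mx) + 1):
--         if n % d == 0:
--             for rest in _facs(n // d, d):
--                 out.append([d] + rest)
--     return out
-- ===== Notes on version B (the rewrite author's own statement) =====
-- stated objective: alternative
-- what changed: A precomputes a dict of ALL factorization lists for every number up to twice the limit bottom-up, deduplicating each merged batch with a quadratic 'not in' scan over growing lists of lists; B drops the table entirely and enumerates the nonincreasing factorizations of each number directly by a top-down divisor recursion, which needs no shared table and no duplicate filtering.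
import Mathlib
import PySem

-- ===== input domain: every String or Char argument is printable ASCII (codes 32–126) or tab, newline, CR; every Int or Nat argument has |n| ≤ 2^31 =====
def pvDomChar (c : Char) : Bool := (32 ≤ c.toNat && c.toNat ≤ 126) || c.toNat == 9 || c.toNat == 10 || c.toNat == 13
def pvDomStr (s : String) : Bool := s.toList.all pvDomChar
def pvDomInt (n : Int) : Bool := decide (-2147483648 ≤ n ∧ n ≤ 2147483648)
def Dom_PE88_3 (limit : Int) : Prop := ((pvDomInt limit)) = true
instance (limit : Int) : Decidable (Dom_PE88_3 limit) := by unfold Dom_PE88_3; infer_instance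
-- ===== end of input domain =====

-- B replaces A's bottom-up table of all factorization lists (with its quadratic duplicate
-- filtering) by a direct top-down recursive enumeration of the nonincreasing factorizations
-- of each number; same return value, genuinely different algorithm (objective: alternative;
-- not claimed faster).

-- ===== PORT A =====
-- condition 'factor_n[-1] >= factor_i[0] and factor_n+factor_i not in factors[number*i]'
-- (fn/fi are never empty in any reachable state; on an empty list Python would raise
-- IndexError, the port returns false there)
def pvCondA (cur : List (List Int)) (fn fi : List Int) : Bool :=
  (match PySem.List.pyGet? fn (-1), PySem.List.pyGet? fi 0 with
   | some a, some b => decide (a ≥ b)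
   | _, _ => false) && !(decide ((fn ++ fi) ∈ cur))

-- 'factors[number*i] += [factor_n+factor_i for factor_n in factors[number] for factor_i in factors[i] if …]'
def pvGenStep (d : PySem.Dict Int (List (List Int))) (number i : Int) :
    PySem.Dict Int (List (List Int)) :=
  let cur := d.getD (number * i) []
  let batch := (d.getD number []).flatMap (fun fn =>
    ((d.getD i []).filter (fun fi => pvCondA cur fn fi)).map (fun fi => fn ++ fi))
  d.insert (number * i) (cur ++ batch)

-- 'for i in range(2, min(number, limit//number)+1):'
def pvGenInner (L number : Int) (d : PySem.Dict Int (List (List Int))) :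
    PySem.Dict Int (List (List Int)) :=
  (PySem.List.pyRange 2 (min number (PySem.Int.floordiv L number) + 1)).foldl
    (fun d i => pvGenStep d number i) d

-- gen_factorization_dict
def genFactorizationDict (L : Int) : PySem.Dict Int (List (List Int)) :=
  let factors := (PySem.List.pyRange 2 (L + 1)).foldl
    (fun d i => d.insert i [[i]]) PySem.Dict.empty
  (PySem.List.pyRange 2 (L + 1)).foldl (fun d number => pvGenInner L number d) factors

-- body of 'for product in factors[number][1:]'
def pvStepA (limit number : Int) (r : PySem.Dict Int Int) (f : List Int) :
    PySem.Dict Int Int :=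
  let k := (f.length : Int) + number - f.sum
  if r.contains k = false ∧ k ≤ limit then r.insert k number else r

-- 'sum(set(result.values()))'
def pvFinishA (r : PySem.Dict Int Int) : Int := (PySem.Set.ofList r.values).sum

-- 'while len(result) < limit-1: … number += 1'; the fuel only makes the recursion
-- structural — PE88_3 supplies enough fuel for every input on which the Python returns
def pvLoopA (limit : Int) (factors : PySem.Dict Int (List (List Int))) :
    Nat → Int → PySem.Dict Int Int → Int
  | fuel, number, r =>
    if (r.size : Int) < limit - 1 then
      match fuel with
      | 0 => pvFinishA r
      | fuel + 1 =>
          pvLoopA limit factors fuel (number + 1)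
            ((PySem.List.slice (factors.getD number []) (some 1)).foldl (pvStepA limit number) r)
    else pvFinishA r

def PE88_3 (limit : Int) : Int :=
  let factors := genFactorizationDict (limit * 2 + 1)
  pvLoopA limit factors (limit * 2).toNat 2 PySem.Dict.empty

-- ===== PORT B =====
-- _facs(n, mx): nonincreasing factorizations of n into factors in [2, mx]; the fuel only
-- makes the recursion structural (n.toNat is always enough: n drops by at least half)
def pvFacs : Nat → Int → Int → List (List Int)
  | 0, _, _ => []
  | fuel + 1, n, mx =>
      if n = 1 then [[]]
      else (PySem.List.pyRange 2 (min n mx + 1)).foldl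
        (fun out d => if PySem.Int.mod n d = 0 then
            out ++ (pvFacs fuel (PySem.Int.floordiv n d) d).map (fun rest => d :: rest)
          else out) []

-- body of 'for f in _facs(number, number)'
def pvStepB (limit number : Int) (r : PySem.Dict Int Int) (f : List Int) :
    PySem.Dict Int Int :=
  if 2 ≤ f.length then
    let k := (f.length : Int) + number - f.sum
    if r.contains k = false ∧ k ≤ limit then r.insert k number else r
  else r

-- 'sum(set(result.values()))'
def pvFinishB (r : PySem.Dict Int Int) : Int := (PySem.Set.ofList r.values).sum

-- 'while len(result) < limit-1: … number += 1' (same totality fuel as in port A)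
def pvLoopB (limit : Int) : Nat → Int → PySem.Dict Int Int → Int
  | fuel, number, r =>
    if (r.size : Int) < limit - 1 then
      match fuel with
      | 0 => pvFinishB r
      | fuel + 1 =>
          pvLoopB limit fuel (number + 1)
            ((pvFacs number.toNat number number).foldl (pvStepB limit number) r)
    else pvFinishB r

def PE88_3_alt (limit : Int) : Int := pvLoopB limit (limit * 2).toNat 2 PySem.Dict.empty

-- ===== PRECONDITION & SPEC =====
def Spec_PE88_3 (limit : Int) (out : Int) : Prop := out = PE88_3_alt limit
instance (limit : Int) (out : Int) : Decidable (Spec_PE88_3 limit out) := by unfold Spec_PE88_3; infer_instance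

-- ===== CLAIM (what is proved, stated in full; the proofs are below) =====
def Claim_equal_PE88_3 : Prop := ∀ (limit : Int), Dom_PE88_3 limit → Spec_PE88_3 limit (PE88_3 limit)

-- ===== LEMMAS AND PROOFS =====
-- Both programs insert, for each 'number' in increasing order, the values
-- k = len(f) + number - sum(f) of the nontrivial nonincreasing factorizations f of
-- 'number' into the result dict (first writer wins).  The proof shows that A's
-- factorization table and B's recursive enumeration produce, per number, the same SET
-- of factorizations — namely pvNIF below with length ≥ 2 — so the two result dicts stay
-- permutations of one another, and sum(set(values)) coincides.

def pvNIF (n : Int) (f : List Int) : Prop :=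
  List.Pairwise (· ≥ ·) f ∧ (∀ x ∈ f, 2 ≤ x) ∧ f.prod = n

lemma pvProd_one_le {l : List Int} (h : ∀ x ∈ l, 2 ≤ x) : 1 ≤ l.prod := by
  induction l with
  | nil => simp
  | cons a l ih =>
      have ha := h a (by simp)
      have := ih (fun x hx => h x (by simp [hx]))
      simp only [List.prod_cons]; nlinarith

lemma pvProd_two_le {l : List Int} (hne : l ≠ []) (h : ∀ x ∈ l, 2 ≤ x) : 2 ≤ l.prod := by
  cases l with
  | nil => exact absurd rfl hne
  | cons a l =>
      have ha := h a (by simp)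
      have := pvProd_one_le (l := l) (fun x hx => h x (by simp [hx]))
      simp only [List.prod_cons]; nlinarith

lemma pvFoldl_append_ite {α β : Type} (p : α → Prop) [DecidablePred p] (g : α → List β) :
    ∀ (l : List α) (acc : List β),
    l.foldl (fun acc x => if p x then acc ++ g x else acc) acc =
      acc ++ (l.filter (fun x => decide (p x))).flatMap g := by
  intro l
  induction l with
  | nil => intro acc; simp
  | cons a l ih =>
      intro acc
      by_cases ha : p a
      · simp [ha, ih, List.append_assoc]
      · simp [ha, ih]

lemma pvFacs_mem : ∀ (fuel : Nat) (n mx : Int) (f : List Int), 1 ≤ n → n.toNat ≤ fuel →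
    (f ∈ pvFacs fuel n mx ↔ (pvNIF n f ∧ ∀ x ∈ f, x ≤ mx)) := by
  intro fuel
  induction fuel with
  | zero => intro n mx f h1 h0; omega
  | succ fuel ih =>
      intro n mx f h1 hf
      by_cases hn1 : n = 1
      · subst hn1
        rw [show pvFacs (fuel+1) 1 mx = [[]] by simp [pvFacs]]
        simp only [List.mem_singleton]
        constructor
        · intro h; subst h
          exact ⟨⟨List.Pairwise.nil, by simp, by simp⟩, by simp⟩
        · rintro ⟨⟨_, h2, hp⟩, _⟩
          by_contra hne
          have := pvProd_two_le (l := f) hne h2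
          omega
      · have hn2 : 2 ≤ n := by omega
        simp only [pvFacs, if_neg hn1]
        rw [pvFoldl_append_ite (p := fun d => PySem.Int.mod n d = 0)
          (g := fun d => (pvFacs fuel (PySem.Int.floordiv n d) d).map (fun rest => d :: rest))]
        simp only [List.nil_append, List.mem_flatMap, List.mem_filter, List.mem_map,
          PySem.List.mem_pyRange_one, decide_eq_true_eq]
        constructor
        · rintro ⟨d, ⟨⟨hd2, hdlt⟩, hmod⟩, rest, hrest, rfl⟩
          have hdvd : d ∣ n := (PySem.Int.mod_eq_zero_iff_dvd n d).1 hmod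
          have hdpos : 0 < d := by omega
          have hdn : d ≤ n := by
            have := min_le_left n mx; omega
          have hdmx : d ≤ mx := by
            have := min_le_right n mx; omega
          rw [PySem.Int.floordiv_eq_ediv_of_pos hdpos] at hrest
          have hq1 : 1 ≤ n / d := by
            rw [Int.le_ediv_iff_mul_le hdpos]; omega
          have hqlt : n / d < n := by
            apply Int.ediv_lt_of_lt_mul (by omega); nlinarith
          have := (ih (n / d) d rest hq1 (by omega)).1 hrest
          obtain ⟨⟨hpw, h2, hprod⟩, hle⟩ := this
          refine ⟨⟨?_, ?_, ?_⟩, ?_⟩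
          · exact List.pairwise_cons.2 ⟨fun x hx => hle x hx, hpw⟩
          · intro x hx
            rcases List.mem_cons.1 hx with rfl | hx
            · exact hd2
            · exact h2 x hx
          · rw [List.prod_cons, hprod, Int.mul_ediv_cancel' hdvd]
          · intro x hx
            rcases List.mem_cons.1 hx with rfl | hx
            · exact hdmx
            · exact le_trans (hle x hx) hdmx
        · rintro ⟨⟨hpw, h2, hprod⟩, hle⟩
          have hfne : f ≠ [] := by
            intro h; subst h; simp at hprod; omega
          cases f with
          | nil => exact absurd rfl hfne
          | cons d rest =>
              have hd2 : 2 ≤ d := h2 d (by simp)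
              have hdmx : d ≤ mx := hle d (by simp)
              obtain ⟨hhead, hpw'⟩ := List.pairwise_cons.1 hpw
              rw [List.prod_cons] at hprod
              have hp1 : 1 ≤ rest.prod := pvProd_one_le (fun x hx => h2 x (by simp [hx]))
              have hdn : d ≤ n := by nlinarith
              have hdvd : d ∣ n := ⟨rest.prod, hprod.symm⟩
              have hqeq : n / d = rest.prod := by
                rw [← hprod, Int.mul_ediv_cancel_left _ (by omega : d ≠ 0)]
              refine ⟨d, ⟨⟨hd2, by have := le_min_iff.2 ⟨hdn, hdmx⟩; omega⟩,
                (PySem.Int.mod_eq_zero_iff_dvd n d).2 hdvd⟩, rest, ?_, rfl⟩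
              rw [PySem.Int.floordiv_eq_ediv_of_pos (by omega), hqeq]
              have hqlt : rest.prod < n := by nlinarith
              refine (ih rest.prod d rest hp1 (by omega)).2 ⟨⟨hpw', fun x hx => h2 x (by simp [hx]), rfl⟩, fun x hx => ?_⟩
              exact hhead x hx

def pvHeadInv (L : Int) (d : PySem.Dict Int (List (List Int))) : Prop :=
  ∀ m, 2 ≤ m → m ≤ L → ∃ tl, d.getD m [] = [m] :: tl
def pvSound (L : Int) (d : PySem.Dict Int (List (List Int))) : Prop :=
  ∀ m, 2 ≤ m → m ≤ L → ∀ f ∈ (d.getD m []).drop 1, pvNIF m f ∧ 2 ≤ f.length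
def pvCompl (L t : Int) (d : PySem.Dict Int (List (List Int))) : Prop :=
  ∀ m f, 2 ≤ m → m ≤ L → pvNIF m f → 2 ≤ f.length → f.dropLast.prod ≤ t → f ∈ d.getD m []
def pvComplI (L number j : Int) (d : PySem.Dict Int (List (List Int))) : Prop :=
  ∀ m f i, 2 ≤ m → m ≤ L → pvNIF m f → 2 ≤ f.length → f.dropLast.prod = number →
    f.getLast? = some i → i ≤ j → f ∈ d.getD m []
lemma pvGenStep_getD_other (d : PySem.Dict Int (List (List Int))) (number i m : Int)
    (h : m ≠ number * i) : (pvGenStep d number i).getD m [] = d.getD m [] := by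
  simp [pvGenStep, PySem.Dict.getD_insert, h]
lemma pvGenStep_getD_self (d : PySem.Dict Int (List (List Int))) (number i : Int) :
    (pvGenStep d number i).getD (number * i) [] = d.getD (number * i) [] ++
      (d.getD number []).flatMap (fun fn =>
        ((d.getD i []).filter (fun fi => pvCondA (d.getD (number * i) []) fn fi)).map
          (fun fi => fn ++ fi)) := by
  simp [pvGenStep]
lemma pvGenStep_mono (d : PySem.Dict Int (List (List Int))) (number i m : Int)
    {f : List Int} (hf : f ∈ d.getD m []) : f ∈ (pvGenStep d number i).getD m [] := by
  by_cases h : m = number * i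
  · subst h; rw [pvGenStep_getD_self]; exact List.mem_append_left _ hf
  · rwa [pvGenStep_getD_other _ _ _ _ h]
lemma pvPairwise_last_le {l : List Int} (hp : List.Pairwise (· ≥ ·) l) (hne : l ≠ [])
    {x : Int} (hx : x ∈ l) : l.getLast hne ≤ x := by
  induction l with
  | nil => simp at hx
  | cons a l ih =>
      rcases List.mem_cons.1 hx with rfl | hx
      · cases l with
        | nil => simp
        | cons b l' =>
            rw [List.getLast_cons (by simp)]
            have := (List.pairwise_cons.1 hp).1
            exact this _ (List.getLast_mem _)
      · have hlne : l ≠ [] := List.ne_nil_of_mem hx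
        rw [List.getLast_cons hlne]
        exact ih (List.pairwise_cons.1 hp).2 hlne hx
lemma pvElem_le_prod {l : List Int} (h : ∀ x ∈ l, 2 ≤ x) {x : Int} (hx : x ∈ l) :
    x ≤ l.prod := by
  induction l with
  | nil => simp at hx
  | cons a l ih =>
      have ha := h a (by simp)
      have h1 : 1 ≤ l.prod := pvProd_one_le (fun y hy => h y (by simp [hy]))
      rcases List.mem_cons.1 hx with rfl | hx
      · simp only [List.prod_cons]; nlinarith
      · have := ih (fun y hy => h y (by simp [hy])) hx
        simp only [List.prod_cons]; nlinarith
lemma pvInitD_getD (l : List Int) : ∀ (d : PySem.Dict Int (List (List Int))) (m : Int),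
    (l.foldl (fun d i => d.insert i [[i]]) d).getD m [] =
      if m ∈ l then [[m]] else d.getD m [] := by
  induction l with
  | nil => intro d m; simp
  | cons a l ih =>
      intro d m
      rw [List.foldl_cons, ih]
      by_cases hm : m ∈ l
      · simp [hm]
      · by_cases hma : m = a
        · subst hma; simp [hm]
        · simp [hm, hma, PySem.Dict.getD_insert]

lemma pvPyGet_head {α : Type} (l : List α) (h : l ≠ []) :
    PySem.List.pyGet? l 0 = some (l.head h) := by
  cases l with
  | nil => exact absurd rfl h
  | cons a t => simp [PySem.List.pyGet?, PySem.List.pyIdx?]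

lemma pvPyGet_last {α : Type} (l : List α) (h : l ≠ []) :
    PySem.List.pyGet? l (-1) = some (l.getLast h) := by
  have hl : 1 ≤ l.length := List.length_pos_iff.2 h
  simp only [PySem.List.pyGet?, PySem.List.pyIdx?]
  rw [if_neg (by omega), if_pos (by omega)]
  simp only [Option.bind_some]
  have h1 : (-(-1:Int)).toNat = 1 := rfl
  rw [h1, List.getLast?_eq_getElem?.symm.trans (List.getLast?_eq_some_getLast h)]

lemma pvPairwise_le_head {l : List Int} (hp : List.Pairwise (· ≥ ·) l) (hne : l ≠ [])
    {x : Int} (hx : x ∈ l) : x ≤ l.head hne := by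
  cases l with
  | nil => exact absurd rfl hne
  | cons a t =>
      rcases List.mem_cons.1 hx with rfl | hx
      · simp
      · exact (List.pairwise_cons.1 hp).1 x hx

lemma pvSingletonNIF {x : Int} (h : 2 ≤ x) : pvNIF x [x] ∧ [x] ≠ [] :=
  ⟨⟨by simp, by intro y hy; simp at hy; omega, by simp⟩, by simp⟩

-- every entry of the dict is [m] or a nontrivial NIF of m
lemma pvSrc (L : Int) (d : PySem.Dict Int (List (List Int))) (hH : pvHeadInv L d)
    (hS : pvSound L d) : ∀ (x : Int), 2 ≤ x → x ≤ L → ∀ fn ∈ d.getD x [],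
      pvNIF x fn ∧ fn ≠ [] := by
  intro x hx2 hxL fn hfn
  obtain ⟨tl, htl⟩ := hH x hx2 hxL
  rw [htl] at hfn
  rcases List.mem_cons.1 hfn with rfl | hfn
  · exact pvSingletonNIF hx2
  · have hmem : fn ∈ (d.getD x []).drop 1 := by rw [htl]; simpa using hfn
    obtain ⟨h1, h2⟩ := hS x hx2 hxL fn hmem
    refine ⟨h1, ?_⟩
    intro hh; subst hh; simp at h2

lemma pvGenStep_inv (L number i : Int) (h2 : 2 ≤ number) (hL : number ≤ L)
    (hi2 : 2 ≤ i) (hiN : i ≤ number) (hiL : i ≤ PySem.Int.floordiv L number)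
    (d : PySem.Dict Int (List (List Int))) (hH : pvHeadInv L d) (hS : pvSound L d)
    (hC : pvCompl L (number - 1) d) :
    pvHeadInv L (pvGenStep d number i) ∧ pvSound L (pvGenStep d number i) ∧
    (∀ m f, 2 ≤ m → m ≤ L → pvNIF m f → 2 ≤ f.length → f.dropLast.prod = number →
      f.getLast? = some i → f ∈ (pvGenStep d number i).getD m []) := by
  have hnum0 : (0:Int) < number := by omega
  have hm0L : number * i ≤ L := by
    have := (PySem.Int.le_floordiv_iff_mul_le (a := L) hnum0).1 hiL
    nlinarith [mul_comm i number]
  have hm02 : 2 ≤ number * i := by nlinarith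
  have hsrc := pvSrc L d hH hS
  -- soundness of every batch element
  have hbatch : ∀ f ∈ (d.getD number []).flatMap (fun fn =>
      ((d.getD i []).filter (fun fi => pvCondA (d.getD (number * i) []) fn fi)).map
        (fun fi => fn ++ fi)), pvNIF (number * i) f ∧ 2 ≤ f.length := by
    intro f hf
    obtain ⟨fn, hfn, hf⟩ := List.mem_flatMap.1 hf
    obtain ⟨fi, hfi', rfl⟩ := List.mem_map.1 hf
    obtain ⟨hfi, hcond⟩ := List.mem_filter.1 hfi'
    obtain ⟨hNn, hnn⟩ := hsrc number h2 hL fn hfn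
    obtain ⟨hNi, hni⟩ := hsrc i hi2 (le_trans hiN hL) fi hfi
    rw [pvCondA, pvPyGet_last fn hnn, pvPyGet_head fi hni] at hcond
    simp only [ge_iff_le, Bool.and_eq_true, decide_eq_true_eq, Bool.not_eq_eq_eq_not,
      Bool.not_true, decide_eq_false_iff_not] at hcond
    have hge : fi.head hni ≤ fn.getLast hnn := hcond.1
    refine ⟨⟨?_, ?_, ?_⟩, ?_⟩
    · refine List.pairwise_append.2 ⟨hNn.1, hNi.1, fun a ha b hb => ?_⟩
      have h1 := pvPairwise_last_le hNn.1 hnn ha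
      have h2' := pvPairwise_le_head hNi.1 hni hb
      simp only [ge_iff_le]
      exact le_trans (le_trans h2' hge) h1
    · intro x hx
      rcases List.mem_append.1 hx with hx | hx
      · exact hNn.2.1 x hx
      · exact hNi.2.1 x hx
    · rw [List.prod_append, hNn.2.2, hNi.2.2]
    · rw [List.length_append]
      have := List.length_pos_iff.2 hnn
      have := List.length_pos_iff.2 hni
      omega
  refine ⟨?_, ?_, ?_⟩
  · -- head invariant
    intro m hm2 hmL
    by_cases hm : m = number * i
    · subst hm
      obtain ⟨tl, htl⟩ := hH _ hm2 hmL
      rw [pvGenStep_getD_self, htl]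
      exact ⟨_, List.cons_append ..⟩
    · rw [pvGenStep_getD_other _ _ _ _ hm]; exact hH m hm2 hmL
  · -- soundness
    intro m hm2 hmL f hf
    by_cases hm : m = number * i
    · subst hm
      rw [pvGenStep_getD_self] at hf
      obtain ⟨tl, htl⟩ := hH _ hm2 hmL
      have hlen1 : 1 ≤ (d.getD (number * i) []).length := by rw [htl]; simp
      rw [List.drop_append_of_le_length hlen1] at hf
      rcases List.mem_append.1 hf with hf | hf
      · exact hS _ hm2 hmL f hf
      · exact hbatch f hf
    · rw [pvGenStep_getD_other _ _ _ _ hm] at hf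
      exact hS m hm2 hmL f hf
  · -- new coverage
    intro m f hm2 hmL hNIF hlen hdp hgl
    have hfne : f ≠ [] := by intro h; subst h; simp at hlen
    have hglast : f.getLast hfne = i := by
      have := List.getLast?_eq_some_getLast hfne
      rw [this] at hgl; exact Option.some.inj hgl
    have hfeq : f.dropLast ++ [i] = f := by
      rw [← hglast]; exact List.dropLast_append_getLast hfne
    have hmeq : m = number * i := by
      have : f.prod = m := hNIF.2.2
      rw [← hfeq, List.prod_append, hdp] at this
      simpa using this.symm
    subst hmeq
    set g := f.dropLast with hg
    have hgne : g ≠ [] := by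
      have : g.length = f.length - 1 := List.length_dropLast
      intro h; rw [h] at this; simp at this; omega
    have hgsub : ∀ x ∈ g, x ∈ f := fun x hx => List.dropLast_subset f hx
    have hgpw : List.Pairwise (· ≥ ·) g := by
      have := hNIF.1
      rw [← hfeq] at this
      exact (List.pairwise_append.1 this).1
    have hg2 : ∀ x ∈ g, 2 ≤ x := fun x hx => hNIF.2.1 x (hgsub x hx)
    have hgmem : g ∈ d.getD number [] := by
      rcases Nat.lt_or_ge g.length 2 with hgl1 | hgl2
      · -- g = [number]
        have : g.length = 1 := by
          have := List.length_pos_iff.2 hgne; omega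
        obtain ⟨x, hx⟩ := List.length_eq_one_iff.1 this
        have hxval : x = number := by
          have := hdp; rw [hx] at this; simpa using this
        obtain ⟨tl, htl⟩ := hH number h2 hL
        rw [hx, hxval, htl]; exact List.mem_cons_self ..
      · -- g is a nontrivial NIF of number
        apply hC number g h2 hL ⟨hgpw, hg2, hdp⟩ hgl2
        -- g.dropLast.prod ≤ number - 1
        have hgne2 : g.dropLast ≠ [] := by
          have : g.dropLast.length = g.length - 1 := List.length_dropLast
          intro h; rw [h] at this; simp at this; omega
        have hgeq : g.dropLast ++ [g.getLast hgne] = g := List.dropLast_append_getLast hgne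
        have hlast2 : 2 ≤ g.getLast hgne := hg2 _ (List.getLast_mem hgne)
        have hp1 : 1 ≤ g.dropLast.prod :=
          pvProd_one_le (fun x hx => hg2 x (List.dropLast_subset g hx))
        have hpe : (g.dropLast ++ [g.getLast hgne]).prod = number := by rw [hgeq, hdp]
        rw [List.prod_append, List.prod_singleton] at hpe
        nlinarith
    have higet : [i] ∈ d.getD i [] := by
      obtain ⟨tl, htl⟩ := hH i hi2 (le_trans hiN hL)
      rw [htl]; exact List.mem_cons_self ..
    rw [pvGenStep_getD_self]
    by_cases hcur : f ∈ d.getD (number * i) []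
    · exact List.mem_append_left _ hcur
    · refine List.mem_append_right _ ?_
      refine List.mem_flatMap.2 ⟨g, hgmem, ?_⟩
      refine List.mem_map.2 ⟨[i], ?_, hfeq⟩
      refine List.mem_filter.2 ⟨higet, ?_⟩
      rw [pvCondA, pvPyGet_last g hgne, pvPyGet_head [i] (by simp)]
      simp only [ge_iff_le, Bool.and_eq_true, decide_eq_true_eq, Bool.not_eq_eq_eq_not,
        Bool.not_true, decide_eq_false_iff_not, List.head_cons]
      constructor
      · have : i ≤ g.getLast hgne := by
          rw [← hglast]
          exact pvPairwise_last_le hNIF.1 hfne (hgsub _ (List.getLast_mem hgne))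
        exact this
      · rw [hfeq]; exact hcur

lemma pvRange_empty {a b : Int} (h : b ≤ a) : PySem.List.pyRange a b = [] := by
  rw [List.eq_nil_iff_forall_not_mem]
  intro x hx
  have := PySem.List.mem_pyRange_one.1 hx
  omega

-- the inner loop, processed up to bound j
lemma pvGenInner_aux (L number : Int) (h2 : 2 ≤ number) (hL : number ≤ L) :
    ∀ (j : Int) (hj : 1 ≤ j), j ≤ min number (PySem.Int.floordiv L number) →
    ∀ d, pvHeadInv L d → pvSound L d → pvCompl L (number - 1) d →
    (pvHeadInv L ((PySem.List.pyRange 2 (j+1)).foldl (fun d i => pvGenStep d number i) d) ∧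
     pvSound L ((PySem.List.pyRange 2 (j+1)).foldl (fun d i => pvGenStep d number i) d) ∧
     pvCompl L (number - 1) ((PySem.List.pyRange 2 (j+1)).foldl (fun d i => pvGenStep d number i) d) ∧
     pvComplI L number j ((PySem.List.pyRange 2 (j+1)).foldl (fun d i => pvGenStep d number i) d)) := by
  intro j hj
  induction j, hj using Int.le_induction with
  | base =>
      intro _ d hH hS hC
      rw [pvRange_empty (by omega)]
      refine ⟨hH, hS, hC, ?_⟩
      intro m f i _ _ hNIF _ _ hgl hile
      have : i ∈ f := List.mem_of_getLast? hgl
      have := hNIF.2.1 i this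
      omega
  | succ j _hj ih =>
      intro hjle d hH hS hC
      have hjle' : j ≤ min number (PySem.Int.floordiv L number) := by omega
      obtain ⟨hH', hS', hC', hI'⟩ := ih hjle' d hH hS hC
      rw [PySem.List.pyRange_one_succ_right (by omega : (2:Int) ≤ j + 1), List.foldl_append]
      simp only [List.foldl_cons, List.foldl_nil]
      set d' := (PySem.List.pyRange 2 (j+1)).foldl (fun d i => pvGenStep d number i) d with hd'
      have hmin1 := min_le_left number (PySem.Int.floordiv L number)
      have hmin2 := min_le_right number (PySem.Int.floordiv L number)
      obtain ⟨hH2, hS2, hNew⟩ := pvGenStep_inv L number (j+1) h2 hL (by omega)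
        (by omega) (by omega) d' hH' hS' hC'
      refine ⟨hH2, hS2, ?_, ?_⟩
      · intro m f hm2 hmL hNIF hlen hdp
        exact pvGenStep_mono _ _ _ _ (hC' m f hm2 hmL hNIF hlen hdp)
      · intro m f i hm2 hmL hNIF hlen hdp hgl hile
        rcases lt_or_ge i (j+1) with hi | hi
        · exact pvGenStep_mono _ _ _ _ (hI' m f i hm2 hmL hNIF hlen hdp hgl (by omega))
        · have : i = j + 1 := by omega
          subst this
          exact hNew m f hm2 hmL hNIF hlen hdp hgl

lemma pvGenInner_inv (L number : Int) (h2 : 2 ≤ number) (hL : number ≤ L)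
    (d : PySem.Dict Int (List (List Int))) (hH : pvHeadInv L d) (hS : pvSound L d)
    (hC : pvCompl L (number - 1) d) :
    pvHeadInv L (pvGenInner L number d) ∧ pvSound L (pvGenInner L number d) ∧
    pvCompl L number (pvGenInner L number d) := by
  have hnum0 : (0:Int) < number := by omega
  set j := min number (PySem.Int.floordiv L number) with hjdef
  -- the missing case dropLast.prod = number forces m = number * getLast ≥ 2*number ≤ L
  have hforce : ∀ m f, 2 ≤ m → m ≤ L → pvNIF m f → 2 ≤ f.length →
      f.dropLast.prod = number → ∃ i, f.getLast? = some i ∧ 2 ≤ i ∧ i ≤ j := by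
    intro m f hm2 hmL hNIF hlen hdp
    have hfne : f ≠ [] := by intro h; subst h; simp at hlen
    refine ⟨f.getLast hfne, List.getLast?_eq_some_getLast hfne, ?_, ?_⟩
    · exact hNIF.2.1 _ (List.getLast_mem hfne)
    · set i := f.getLast hfne with hi
      have hfeq : f.dropLast ++ [i] = f := List.dropLast_append_getLast hfne
      have hgne : f.dropLast ≠ [] := by
        have : f.dropLast.length = f.length - 1 := List.length_dropLast
        intro h; rw [h] at this; simp at this; omega
      have hmeq : number * i = m := by
        have : f.prod = m := hNIF.2.2
        rw [← hfeq, List.prod_append, List.prod_singleton, hdp] at this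
        exact this
      have hi2 : 2 ≤ i := hNIF.2.1 _ (List.getLast_mem hfne)
      have hiN : i ≤ number := by
        obtain ⟨x, hx⟩ := List.exists_mem_of_ne_nil _ hgne
        have hxf : x ∈ f := List.dropLast_subset f hx
        have h1 : i ≤ x := pvPairwise_last_le hNIF.1 hfne hxf
        have h2' : x ≤ f.dropLast.prod :=
          pvElem_le_prod (fun y hy => hNIF.2.1 y (List.dropLast_subset f hy)) hx
        omega
      have hiF : i ≤ PySem.Int.floordiv L number := by
        rw [PySem.Int.le_floordiv_iff_mul_le hnum0]
        nlinarith
      exact le_min hiN hiF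
  rcases lt_or_ge j 1 with hj1 | hj1
  · -- empty inner range
    have : pvGenInner L number d = d := by
      rw [pvGenInner, ← hjdef, pvRange_empty (by omega)]
      rfl
    rw [this]
    refine ⟨hH, hS, ?_⟩
    intro m f hm2 hmL hNIF hlen hdp
    rcases lt_or_ge f.dropLast.prod number with h | h
    · exact hC m f hm2 hmL hNIF hlen (by omega)
    · have heq : f.dropLast.prod = number := by omega
      obtain ⟨i, _, hi2, hij⟩ := hforce m f hm2 hmL hNIF hlen heq
      omega
  · obtain ⟨hH', hS', hC', hI'⟩ := pvGenInner_aux L number h2 hL j hj1 (le_refl _) d hH hS hC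
    rw [pvGenInner, ← hjdef]
    refine ⟨hH', hS', ?_⟩
    intro m f hm2 hmL hNIF hlen hdp
    rcases lt_or_ge f.dropLast.prod number with h | h
    · exact hC' m f hm2 hmL hNIF hlen (by omega)
    · have heq : f.dropLast.prod = number := by omega
      obtain ⟨i, hgl, hi2, hij⟩ := hforce m f hm2 hmL hNIF hlen heq
      exact hI' m f i hm2 hmL hNIF hlen heq hgl hij

lemma pvGen_inv (L : Int) (hL : 1 ≤ L) : pvHeadInv L (genFactorizationDict L) ∧
    pvSound L (genFactorizationDict L) ∧ pvCompl L L (genFactorizationDict L) := by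
  have hinit : ∀ t : Int, 1 ≤ t → t ≤ L →
      (pvHeadInv L ((PySem.List.pyRange 2 (t+1)).foldl (fun d number => pvGenInner L number d)
        ((PySem.List.pyRange 2 (L + 1)).foldl (fun d i => d.insert i [[i]]) PySem.Dict.empty)) ∧
       pvSound L ((PySem.List.pyRange 2 (t+1)).foldl (fun d number => pvGenInner L number d)
        ((PySem.List.pyRange 2 (L + 1)).foldl (fun d i => d.insert i [[i]]) PySem.Dict.empty)) ∧
       pvCompl L t ((PySem.List.pyRange 2 (t+1)).foldl (fun d number => pvGenInner L number d)
        ((PySem.List.pyRange 2 (L + 1)).foldl (fun d i => d.insert i [[i]]) PySem.Dict.empty))) := by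
    intro t ht
    induction t, ht using Int.le_induction with
    | base =>
        intro _
        rw [pvRange_empty (a := 2) (b := (1:Int)+1) (by omega)]
        simp only [List.foldl_nil]
        refine ⟨?_, ?_, ?_⟩
        · intro m hm2 hmL
          rw [pvInitD_getD, if_pos (PySem.List.mem_pyRange_one.2 ⟨hm2, by omega⟩)]
          exact ⟨[], rfl⟩
        · intro m hm2 hmL f hf
          rw [pvInitD_getD, if_pos (PySem.List.mem_pyRange_one.2 ⟨hm2, by omega⟩)] at hf
          simp at hf
        · intro m f hm2 hmL hNIF hlen hdp
          have hgne : f.dropLast ≠ [] := by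
            have : f.dropLast.length = f.length - 1 := List.length_dropLast
            intro h; rw [h] at this; simp at this; omega
          have := pvProd_two_le hgne (fun x hx => hNIF.2.1 x (List.dropLast_subset f hx))
          omega
    | succ t ht ih =>
        intro htL
        obtain ⟨hH, hS, hC⟩ := ih (by omega)
        rw [show ((t:Int)+1+1) = (t+1)+1 from rfl,
          PySem.List.pyRange_one_succ_right (b := t+1) (by omega : (2:Int) ≤ t + 1),
          List.foldl_append]
        simp only [List.foldl_cons, List.foldl_nil]
        have := pvGenInner_inv L (t+1) (by omega) htL _ hH hS
          (by simpa using hC)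
        exact this
  have hgen : genFactorizationDict L =
      (PySem.List.pyRange 2 (L+1)).foldl (fun d number => pvGenInner L number d)
        ((PySem.List.pyRange 2 (L + 1)).foldl (fun d i => d.insert i [[i]]) PySem.Dict.empty) := by
    rw [genFactorizationDict]
  rw [hgen]
  exact hinit L hL (le_refl _)

lemma pvGen_tail_mem (L n : Int) (h2 : 2 ≤ n) (hL : n ≤ L) (f : List Int) :
    (f ∈ ((genFactorizationDict L).getD n []).drop 1 ↔ (pvNIF n f ∧ 2 ≤ f.length)) := by
  obtain ⟨hH, hS, hC⟩ := pvGen_inv L (by omega)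
  constructor
  · exact fun hf => hS n h2 hL f hf
  · rintro ⟨hNIF, hlen⟩
    have hfne : f ≠ [] := by intro h; subst h; simp at hlen
    have hgne : f.dropLast ≠ [] := by
      have : f.dropLast.length = f.length - 1 := List.length_dropLast
      intro h; rw [h] at this; simp at this; omega
    have hdrople : f.dropLast.prod ≤ L := by
      have hfeq : f.dropLast ++ [f.getLast hfne] = f := List.dropLast_append_getLast hfne
      have hpe : f.dropLast.prod * f.getLast hfne = n := by
        have : f.prod = n := hNIF.2.2
        rw [← hfeq, List.prod_append, List.prod_singleton] at this
        exact this
      have h1 : 1 ≤ f.dropLast.prod :=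
        pvProd_one_le (fun x hx => hNIF.2.1 x (List.dropLast_subset f hx))
      have h2' : 2 ≤ f.getLast hfne := hNIF.2.1 _ (List.getLast_mem hfne)
      nlinarith
    have hmem := hC n f h2 hL hNIF hlen hdrople
    obtain ⟨tl, htl⟩ := hH n h2 hL
    rw [htl] at hmem ⊢
    simp only [List.drop_succ_cons, List.drop_zero]
    rcases List.mem_cons.1 hmem with rfl | hmem
    · simp at hlen
    · exact hmem

lemma pvSum_set_perm {l l' : List Int} (h : l.Perm l') :
    (PySem.Set.ofList l).sum = (PySem.Set.ofList l').sum := by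
  refine List.Perm.sum_eq ?_
  rw [List.perm_ext_iff_of_nodup (PySem.Set.nodup_ofList _) (PySem.Set.nodup_ofList _)]
  intro a
  rw [PySem.Set.mem_ofList, PySem.Set.mem_ofList]
  exact h.mem_iff

-- generic characterization of one round of 'if k not in result and k <= limit: result[k] = number'
lemma pvFold_char (limit number : Int) (P : List Int → Bool) :
    ∀ (l : List (List Int)) (r : PySem.Dict Int Int), r.keys.Nodup →
    ((l.foldl (fun r f =>
        if P f = true then
          (if r.contains ((f.length : Int) + number - f.sum) = false ∧
              (f.length : Int) + number - f.sum ≤ limit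
           then r.insert ((f.length : Int) + number - f.sum) number else r)
        else r) r).keys.Nodup ∧
     ∀ p : Int × Int, p ∈ (l.foldl (fun r f =>
        if P f = true then
          (if r.contains ((f.length : Int) + number - f.sum) = false ∧
              (f.length : Int) + number - f.sum ≤ limit
           then r.insert ((f.length : Int) + number - f.sum) number else r)
        else r) r).items ↔
       (p ∈ r.items ∨ (p.2 = number ∧
         (∃ f ∈ l, P f = true ∧ (f.length : Int) + number - f.sum = p.1) ∧
         r.contains p.1 = false ∧ p.1 ≤ limit))) := by
  intro l
  induction l with
  | nil =>
      intro r hnd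
      exact ⟨hnd, fun p => by simp⟩
  | cons f₀ l ih =>
      intro r hnd
      rw [List.foldl_cons]
      by_cases hP : P f₀ = true
      · by_cases hcond : r.contains ((f₀.length : Int) + number - f₀.sum) = false ∧
            (f₀.length : Int) + number - f₀.sum ≤ limit
        · rw [if_pos hP, if_pos hcond]
          obtain ⟨hnd', hmem⟩ :=
            ih (r.insert ((f₀.length : Int) + number - f₀.sum) number)
              (PySem.Dict.nodup_keys_insert _ _ _ hnd)
          refine ⟨hnd', fun p => ?_⟩
          rw [hmem p, PySem.Dict.items_insert_of_not_contains _ _ hcond.1, List.mem_append]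
          constructor
          · rintro ((hp | hp) | ⟨h2, ⟨f, hf, hPf, hk⟩, hcon, hle⟩)
            · exact Or.inl hp
            · simp only [List.mem_singleton] at hp
              refine Or.inr ⟨by rw [hp], ⟨f₀, List.mem_cons_self .., hP, by rw [hp]⟩,
                by rw [hp]; exact hcond.1, by rw [hp]; exact hcond.2⟩
            · rw [PySem.Dict.contains_insert] at hcon
              rcases Bool.or_eq_false_iff.1 hcon with ⟨hne, hrcon⟩
              exact Or.inr ⟨h2, ⟨f, List.mem_cons_of_mem _ hf, hPf, hk⟩, hrcon, hle⟩
          · rintro (hp | ⟨h2, ⟨f, hf, hPf, hk⟩, hcon, hle⟩)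
            · exact Or.inl (Or.inl hp)
            · by_cases hpk : p.1 = (f₀.length : Int) + number - f₀.sum
              · refine Or.inl (Or.inr ?_)
                simp only [List.mem_singleton]
                have : p = (p.1, p.2) := rfl
                rw [this, hpk, h2]
              · rcases List.mem_cons.1 hf with rfl | hf
                · exact absurd hk.symm hpk
                · refine Or.inr ⟨h2, ⟨f, hf, hPf, hk⟩, ?_, hle⟩
                  rw [PySem.Dict.contains_insert]
                  rw [Bool.or_eq_false_iff]
                  exact ⟨beq_eq_false_iff_ne.2 hpk, hcon⟩
        · rw [if_pos hP, if_neg hcond]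
          obtain ⟨hnd', hmem⟩ := ih r hnd
          refine ⟨hnd', fun p => ?_⟩
          rw [hmem p]
          constructor
          · rintro (hp | ⟨h2, ⟨f, hf, hPf, hk⟩, hcon, hle⟩)
            · exact Or.inl hp
            · exact Or.inr ⟨h2, ⟨f, List.mem_cons_of_mem _ hf, hPf, hk⟩, hcon, hle⟩
          · rintro (hp | ⟨h2, ⟨f, hf, hPf, hk⟩, hcon, hle⟩)
            · exact Or.inl hp
            · rcases List.mem_cons.1 hf with rfl | hf
              · rw [← hk] at hcon hle
                exact absurd ⟨hcon, hle⟩ hcond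
              · exact Or.inr ⟨h2, ⟨f, hf, hPf, hk⟩, hcon, hle⟩
      · rw [if_neg hP]
        obtain ⟨hnd', hmem⟩ := ih r hnd
        refine ⟨hnd', fun p => ?_⟩
        rw [hmem p]
        constructor
        · rintro (hp | ⟨h2, ⟨f, hf, hPf, hk⟩, hcon, hle⟩)
          · exact Or.inl hp
          · exact Or.inr ⟨h2, ⟨f, List.mem_cons_of_mem _ hf, hPf, hk⟩, hcon, hle⟩
        · rintro (hp | ⟨h2, ⟨f, hf, hPf, hk⟩, hcon, hle⟩)
          · exact Or.inl hp
          · rcases List.mem_cons.1 hf with rfl | hf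
            · exact absurd hPf hP
            · exact Or.inr ⟨h2, ⟨f, hf, hPf, hk⟩, hcon, hle⟩

lemma pvStepA_eq (limit number : Int) : pvStepA limit number = (fun r f =>
    if (fun (_ : List Int) => true) f = true then
      (if r.contains ((f.length : Int) + number - f.sum) = false ∧
          (f.length : Int) + number - f.sum ≤ limit
       then r.insert ((f.length : Int) + number - f.sum) number else r)
    else r) := by
  funext r f
  simp [pvStepA]

lemma pvStepB_eq (limit number : Int) : pvStepB limit number = (fun r f =>
    if (fun (f : List Int) => decide (2 ≤ f.length)) f = true then
      (if r.contains ((f.length : Int) + number - f.sum) = false ∧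
          (f.length : Int) + number - f.sum ≤ limit
       then r.insert ((f.length : Int) + number - f.sum) number else r)
    else r) := by
  funext r f
  by_cases h : 2 ≤ f.length
  · simp [pvStepB, h]
  · simp [pvStepB, h]

lemma pvLoop_eq (limit : Int) : ∀ (fuel : Nat) (number : Int) (rA rB : PySem.Dict Int Int),
    2 ≤ number → number + (fuel : Int) ≤ 2 * limit + 2 →
    rA.keys.Nodup → rB.keys.Nodup → rA.items.Perm rB.items →
    pvLoopA limit (genFactorizationDict (limit * 2 + 1)) fuel number rA =
      pvLoopB limit fuel number rB := by
  intro fuel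
  induction fuel with
  | zero =>
      intro number rA rB _ _ _ _ hperm
      have hsize : rA.size = rB.size := by
        simp only [PySem.Dict.size]; exact hperm.length_eq
      have hfin : pvFinishA rA = pvFinishB rB := by
        rw [pvFinishA, pvFinishB]
        exact pvSum_set_perm (hperm.map _)
      rw [pvLoopA, pvLoopB, hsize]
      by_cases hc : ((rB.size : Int) < limit - 1)
      · rw [if_pos hc, if_pos hc]; exact hfin
      · rw [if_neg hc, if_neg hc]; exact hfin
  | succ fuel ih =>
      intro number rA rB hn2 hbound hndA hndB hperm
      have hsize : rA.size = rB.size := by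
        simp only [PySem.Dict.size]; exact hperm.length_eq
      have hfin : pvFinishA rA = pvFinishB rB := by
        rw [pvFinishA, pvFinishB]
        exact pvSum_set_perm (hperm.map _)
      rw [pvLoopA, pvLoopB, hsize]
      by_cases hc : ((rB.size : Int) < limit - 1)
      swap
      · rw [if_neg hc, if_neg hc]; exact hfin
      rw [if_pos hc, if_pos hc]
      -- the per-number candidate lists
      have hnL : number ≤ limit * 2 + 1 := by push_cast at hbound; omega
      have hLA : PySem.List.slice ((genFactorizationDict (limit * 2 + 1)).getD number [])
          (some 1) = ((genFactorizationDict (limit * 2 + 1)).getD number []).drop 1 := by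
        rw [PySem.List.slice_from _ (by omega : (0:Int) ≤ 1)]
        rfl
      -- characterize both new dicts
      obtain ⟨hndA', hmemA⟩ := pvFold_char limit number (fun _ => true)
        (((genFactorizationDict (limit * 2 + 1)).getD number []).drop 1) rA hndA
      obtain ⟨hndB', hmemB⟩ := pvFold_char limit number (fun f => decide (2 ≤ f.length))
        (pvFacs number.toNat number number) rB hndB
      rw [hLA, pvStepA_eq, pvStepB_eq]
      -- key sets agree
      have hkey : ∀ x : Int,
          (∃ f ∈ ((genFactorizationDict (limit * 2 + 1)).getD number []).drop 1,
            (fun (_ : List Int) => true) f = true ∧ (f.length : Int) + number - f.sum = x) ↔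
          (∃ f ∈ pvFacs number.toNat number number,
            (fun (f : List Int) => decide (2 ≤ f.length)) f = true ∧
              (f.length : Int) + number - f.sum = x) := by
        intro x
        constructor
        · rintro ⟨f, hf, -, hk⟩
          have hmm := (pvGen_tail_mem (limit * 2 + 1) number hn2 hnL f).1 hf
          refine ⟨f, ?_, by simpa using hmm.2, hk⟩
          refine (pvFacs_mem number.toNat number number f (by omega) (le_refl _)).2
            ⟨hmm.1, fun y hy => ?_⟩
          have hle := pvElem_le_prod hmm.1.2.1 hy
          rw [hmm.1.2.2] at hle
          exact hle
        · rintro ⟨f, hf, hPf, hk⟩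
          have hmem := (pvFacs_mem number.toNat number number f (by omega) (le_refl _)).1 hf
          refine ⟨f, ?_, rfl, hk⟩
          exact (pvGen_tail_mem (limit * 2 + 1) number hn2 hnL f).2
            ⟨hmem.1, by simpa using hPf⟩
      -- contains agree
      have hcontains : ∀ x : Int, rA.contains x = rB.contains x := by
        intro x
        have hk : ∀ y, y ∈ rA.keys ↔ y ∈ rB.keys := by
          intro y
          simp only [PySem.Dict.keys]
          exact (hperm.map _).mem_iff
        by_cases h : rB.contains x = true
        · rw [h]; exact (PySem.Dict.contains_iff_mem_keys rA x).2
            ((hk x).2 ((PySem.Dict.contains_iff_mem_keys rB x).1 h))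
        · have h' : rB.contains x = false := by revert h; cases rB.contains x <;> simp
          rw [h']
          by_contra hA
          have hA' : rA.contains x = true := by revert hA; cases rA.contains x <;> simp
          exact absurd ((PySem.Dict.contains_iff_mem_keys rB x).2
            ((hk x).1 ((PySem.Dict.contains_iff_mem_keys rA x).1 hA'))) (by rw [h']; simp)
      -- the new dicts are permutations
      have hpermnew : (((((genFactorizationDict (limit * 2 + 1)).getD number []).drop 1)).foldl
          (fun r f =>
            if (fun (_ : List Int) => true) f = true then
              (if r.contains ((f.length : Int) + number - f.sum) = false ∧
                  (f.length : Int) + number - f.sum ≤ limit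
               then r.insert ((f.length : Int) + number - f.sum) number else r)
            else r) rA).items.Perm
          (((pvFacs number.toNat number number)).foldl
          (fun r f =>
            if (fun (f : List Int) => decide (2 ≤ f.length)) f = true then
              (if r.contains ((f.length : Int) + number - f.sum) = false ∧
                  (f.length : Int) + number - f.sum ≤ limit
               then r.insert ((f.length : Int) + number - f.sum) number else r)
            else r) rB).items := by
        rw [List.perm_ext_iff_of_nodup
          (List.Nodup.of_map _ (by simpa only [PySem.Dict.keys] using hndA'))
          (List.Nodup.of_map _ (by simpa only [PySem.Dict.keys] using hndB'))]
        intro p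
        rw [hmemA p, hmemB p, hperm.mem_iff, hkey p.1, hcontains p.1]
      exact ih (number + 1) _ _ (by omega) (by push_cast at hbound ⊢; omega) hndA' hndB' hpermnew

-- ===== VERDICT (by name: the statement is the Claim_ definition above) =====
theorem PE88_3_spec : Claim_equal_PE88_3 := by
  intro limit _
  unfold Spec_PE88_3 PE88_3 PE88_3_alt
  by_cases hl : limit ≤ 1
  · have hstop : ¬(((PySem.Dict.empty : PySem.Dict Int Int).size : Int) < limit - 1) := by
      rw [PySem.Dict.size_empty]; omega
    rw [pvLoopA.eq_def, pvLoopB.eq_def]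
    simp only []
    rw [if_neg hstop, if_neg hstop]
    rfl
  · have h0 : 0 ≤ limit * 2 := by omega
    exact pvLoop_eq limit (limit * 2).toNat 2 _ _ (by omega)
      (by rw [Int.toNat_of_nonneg h0]; omega)
      PySem.Dict.nodup_keys_empty PySem.Dict.nodup_keys_empty (List.Perm.refl _)
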